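-- pv_equiv track=rewrite | github.com/TrueV1sion/ai-roadtrip-storyteller | backend/app/services/reservation_management_service.py | _determine_providers
-- ===== SOURCE A (Python) =====
-- from typing import Dict, List, Optional, Any, Tuple
-- from enum import Enum
--
-- class BookingProvider(str, Enum):
--     """Supported booking providers"""
--     OPENTABLE = "opentable"
--     RESY = "resy"
--     RECREATION_GOV = "recreation_gov"
--     SHELL_RECHARGE = "shell_recharge"
--     VIATOR = "viator"
--     AIRBNB = "airbnb"
--     BOOKING_COM = "booking_com"
--     PARKWHIZ = "parkwhiz"
--     INTERNAL = "internal"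
--
-- def _determine_providers(
--
--     query: str,
--     filters: Optional[Dict[str, Any]]
-- ) -> List[BookingProvider]:
--     """Determine which providers to search based on query"""
--     providers = []
--
--     query_lower = query.lower()
--
--     # Restaurant keywords
--     if any(word in query_lower for word in ['restaurant', 'dining', 'eat', 'food', 'cuisine']):
--         providers.extend([BookingProvider.OPENTABLE, BookingProvider.RESY])
--
--     # Camping/outdoor keywords
--     if any(word in query_lower for word in ['camp', 'camping', 'park', 'trail', 'hike']):
--         providers.append(BookingProvider.RECREATION_GOV)
--
--     # EV charging keywords
--     if any(word in query_lower for word in ['charging', 'ev', 'electric', 'charge']):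
--         providers.append(BookingProvider.SHELL_RECHARGE)
--
--     # Activity keywords
--     if any(word in query_lower for word in ['tour', 'activity', 'experience', 'adventure']):
--         providers.append(BookingProvider.VIATOR)
--
--     # Hotel keywords
--     if any(word in query_lower for word in ['hotel', 'stay', 'accommodation', 'room']):
--         providers.extend([BookingProvider.BOOKING_COM, BookingProvider.AIRBNB])
--
--     # Parking keywords
--     if any(word in query_lower for word in ['parking', 'park', 'garage']):
--         providers.append(BookingProvider.PARKWHIZ)
--
--     # If no specific match, search all
--     if not providers:
--         providers = list(BookingProvider)
--
--     # Apply filters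
--     if filters and filters.get('providers'):
--         providers = [p for p in providers if p in filters['providers']]
--
--     return providers
-- ===== SOURCE B (Python) =====
-- from typing import Dict, List, Optional, Any
-- from enum import Enum
--
-- class BookingProvider(str, Enum):
--     """Supported booking providers"""
--     OPENTABLE = "opentable"
--     RESY = "resy"
--     RECREATION_GOV = "recreation_gov"
--     SHELL_RECHARGE = "shell_recharge"
--     VIATOR = "viator"
--     AIRBNB = "airbnb"
--     BOOKING_COM = "booking_com"
--     PARKWHIZ = "parkwhiz"
--     INTERNAL = "internal"
--
-- # Provider groups in rule order (rule r contributes _GROUPS[r], in order).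
-- _GROUPS = [
--     [BookingProvider.OPENTABLE, BookingProvider.RESY],
--     [BookingProvider.RECREATION_GOV],
--     [BookingProvider.SHELL_RECHARGE],
--     [BookingProvider.VIATOR],
--     [BookingProvider.BOOKING_COM, BookingProvider.AIRBNB],
--     [BookingProvider.PARKWHIZ],
-- ]
--
-- # Flat multi-pattern table: (keyword, rule indices it triggers).
-- # 'park' triggers both the camping rule (1) and the parking rule (5).
-- _KEYWORDS = [
--     ("restaurant", [0]), ("dining", [0]), ("eat", [0]), ("food", [0]), ("cuisine", [0]),
--     ("camp", [1]), ("camping", [1]), ("park", [1, 5]), ("trail", [1]), ("hike", [1]),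
--     ("charging", [2]), ("ev", [2]), ("electric", [2]), ("charge", [2]),
--     ("tour", [3]), ("activity", [3]), ("experience", [3]), ("adventure", [3]),
--     ("hotel", [4]), ("stay", [4]), ("accommodation", [4]), ("room", [4]),
--     ("parking", [5]), ("garage", [5]),
-- ]
--
-- def _determine_providers(
--     query: str,
--     filters: Optional[Dict[str, Any]]
-- ) -> List[BookingProvider]:
--     """Single left-to-right multi-pattern scan of the query: at each position,
--     record the rules whose keyword starts there; then emit the provider groups
--     of the matched rules in rule order."""
--     q = query.lower()
--     matched = set()
--     for i in range(len(q)):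
--         for kw, rules in _KEYWORDS:
--             if q.startswith(kw, i):
--                 matched.update(rules)
--     providers = [p for r in range(len(_GROUPS)) if r in matched for p in _GROUPS[r]]
--     if not providers:
--         providers = list(BookingProvider)
--     if filters and filters.get('providers'):
--         providers = [p for p in providers if p in filters['providers']]
--     return providers
-- ===== Notes on version B (the rewrite author's own statement) =====
-- stated objective: alternative
-- what changed: Instead of six independent keyword-containment branches, B does one left-to-right multi-pattern scan of the query (at each position it tests which keywords of a flat (keyword, rule-indices) table start there), accumulates the matched rule indices in a set, and then emits the provider groups of the matched rules in rule order; fallback and filter steps are unchanged.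
import Mathlib
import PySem

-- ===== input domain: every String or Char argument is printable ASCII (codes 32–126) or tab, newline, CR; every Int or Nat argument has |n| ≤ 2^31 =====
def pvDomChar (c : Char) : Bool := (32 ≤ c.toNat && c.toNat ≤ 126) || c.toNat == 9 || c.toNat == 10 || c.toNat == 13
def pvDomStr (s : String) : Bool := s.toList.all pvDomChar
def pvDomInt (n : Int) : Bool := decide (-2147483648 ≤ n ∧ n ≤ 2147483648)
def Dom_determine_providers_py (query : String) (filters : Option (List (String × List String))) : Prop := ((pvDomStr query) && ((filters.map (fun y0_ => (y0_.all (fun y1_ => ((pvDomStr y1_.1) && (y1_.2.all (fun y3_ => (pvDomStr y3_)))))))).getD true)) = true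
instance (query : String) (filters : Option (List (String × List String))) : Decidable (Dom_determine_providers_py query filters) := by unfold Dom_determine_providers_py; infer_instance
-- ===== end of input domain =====

-- B replaces A's six independent keyword-containment branches by a single left-to-right
-- multi-pattern position scan of the query that collects the set of matched rules, then
-- emits the provider groups of the matched rules in rule order (objective: alternative).

-- ===== PORT A =====
def determine_providers_py (query : String) (filters : Option (List (String × List String))) : List String :=
  let query_lower := PySem.Str.lower query
  let providers : List String := []
  let providers := if ["restaurant", "dining", "eat", "food", "cuisine"].any (fun word => PySem.Str.isIn word query_lower) then providers ++ ["opentable", "resy"] else providers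
  let providers := if ["camp", "camping", "park", "trail", "hike"].any (fun word => PySem.Str.isIn word query_lower) then providers ++ ["recreation_gov"] else providers
  let providers := if ["charging", "ev", "electric", "charge"].any (fun word => PySem.Str.isIn word query_lower) then providers ++ ["shell_recharge"] else providers
  let providers := if ["tour", "activity", "experience", "adventure"].any (fun word => PySem.Str.isIn word query_lower) then providers ++ ["viator"] else providers
  let providers := if ["hotel", "stay", "accommodation", "room"].any (fun word => PySem.Str.isIn word query_lower) then providers ++ ["booking_com", "airbnb"] else providers
  let providers := if ["parking", "park", "garage"].any (fun word => PySem.Str.isIn word query_lower) then providers ++ ["parkwhiz"] else providers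
  let providers := if providers.isEmpty then ["opentable", "resy", "recreation_gov", "shell_recharge", "viator", "airbnb", "booking_com", "parkwhiz", "internal"] else providers
  match filters with
  | none => providers
  | some f =>
    if !f.isEmpty && !(PySem.Dict.getD (PySem.Dict.mk f) "providers" []).isEmpty then
      providers.filter (fun p => (PySem.Dict.getD (PySem.Dict.mk f) "providers" []).contains p)
    else providers

-- ===== PORT B =====
-- Provider groups in rule order (rule r contributes pvGroups[r]).
def pvGroups : List (List String) :=
  [["opentable", "resy"], ["recreation_gov"], ["shell_recharge"], ["viator"],
   ["booking_com", "airbnb"], ["parkwhiz"]]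

-- Flat multi-pattern table: (keyword, rule indices it triggers); 'park' triggers rules 1 and 5.
def pvKeywords : List (String × List Int) :=
  [("restaurant", [0]), ("dining", [0]), ("eat", [0]), ("food", [0]), ("cuisine", [0]),
   ("camp", [1]), ("camping", [1]), ("park", [1, 5]), ("trail", [1]), ("hike", [1]),
   ("charging", [2]), ("ev", [2]), ("electric", [2]), ("charge", [2]),
   ("tour", [3]), ("activity", [3]), ("experience", [3]), ("adventure", [3]),
   ("hotel", [4]), ("stay", [4]), ("accommodation", [4]), ("room", [4]),
   ("parking", [5]), ("garage", [5])]

def determine_providers_py_alt (query : String) (filters : Option (List (String × List String))) : List String :=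
  let q := PySem.Str.lower query
  -- matched = set(); for i in range(len(q)): for kw, rules in _KEYWORDS: if q.startswith(kw, i): matched.update(rules)
  -- q.startswith(kw, i) with 0 ≤ i is exactly the prefix test of kw on q[i:] (PySem.Chars.startswith on the drop)
  let matched : PySem.Set Int :=
    (PySem.List.pyRange 0 (PySem.Str.len q) 1).foldl (fun m i =>
      pvKeywords.foldl (fun m kr =>
        if PySem.Chars.startswith (q.toList.drop i.toNat) kr.1.toList then PySem.Set.update m kr.2 else m) m)
      PySem.Set.empty
  -- providers = [p for r in range(len(_GROUPS)) if r in matched for p in _GROUPS[r]]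
  let providers := (PySem.List.pyRange 0 (pvGroups.length : Int) 1).flatMap
      (fun r => if PySem.Set.contains matched r then PySem.List.pyGetD pvGroups r [] else [])
  let providers := if providers.isEmpty then ["opentable", "resy", "recreation_gov", "shell_recharge", "viator", "airbnb", "booking_com", "parkwhiz", "internal"] else providers
  match filters with
  | none => providers
  | some f =>
    if !f.isEmpty && !(PySem.Dict.getD (PySem.Dict.mk f) "providers" []).isEmpty then
      providers.filter (fun p => (PySem.Dict.getD (PySem.Dict.mk f) "providers" []).contains p)
    else providers

-- ===== PRECONDITION & SPEC =====
def Spec_determine_providers_py (query : String) (filters : Option (List (String × List String))) (out : List String) : Prop := out = determine_providers_py_alt query filters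
instance (query : String) (filters : Option (List (String × List String))) (out : List String) : Decidable (Spec_determine_providers_py query filters out) := by unfold Spec_determine_providers_py; infer_instance

-- ===== CLAIM (what is proved, stated in full; the proofs are below) =====
def Claim_equal_determine_providers_py : Prop := ∀ (query : String) (filters : Option (List (String × List String))), Dom_determine_providers_py query filters → Spec_determine_providers_py query filters (determine_providers_py query filters)

-- ===== LEMMAS AND PROOFS =====

-- the common tail (fallback + filter) of both ports, as a function of the pre-fallback list
def pvPost (providers : List String) (filters : Option (List (String × List String))) : List String :=
  let providers := if providers.isEmpty then ["opentable", "resy", "recreation_gov", "shell_recharge", "viator", "airbnb", "booking_com", "parkwhiz", "internal"] else providers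
  match filters with
  | none => providers
  | some f =>
    if !f.isEmpty && !(PySem.Dict.getD (PySem.Dict.mk f) "providers" []).isEmpty then
      providers.filter (fun p => (PySem.Dict.getD (PySem.Dict.mk f) "providers" []).contains p)
    else providers

-- A's pre-fallback list
def pvPreA (query : String) : List String :=
  let query_lower := PySem.Str.lower query
  let providers : List String := []
  let providers := if ["restaurant", "dining", "eat", "food", "cuisine"].any (fun word => PySem.Str.isIn word query_lower) then providers ++ ["opentable", "resy"] else providers
  let providers := if ["camp", "camping", "park", "trail", "hike"].any (fun word => PySem.Str.isIn word query_lower) then providers ++ ["recreation_gov"] else providers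
  let providers := if ["charging", "ev", "electric", "charge"].any (fun word => PySem.Str.isIn word query_lower) then providers ++ ["shell_recharge"] else providers
  let providers := if ["tour", "activity", "experience", "adventure"].any (fun word => PySem.Str.isIn word query_lower) then providers ++ ["viator"] else providers
  let providers := if ["hotel", "stay", "accommodation", "room"].any (fun word => PySem.Str.isIn word query_lower) then providers ++ ["booking_com", "airbnb"] else providers
  if ["parking", "park", "garage"].any (fun word => PySem.Str.isIn word query_lower) then providers ++ ["parkwhiz"] else providers

-- B's matched set and pre-fallback list
def pvMatched (query : String) : PySem.Set Int :=
  let q := PySem.Str.lower query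
  (PySem.List.pyRange 0 (PySem.Str.len q) 1).foldl (fun m i =>
    pvKeywords.foldl (fun m kr =>
      if PySem.Chars.startswith (q.toList.drop i.toNat) kr.1.toList then PySem.Set.update m kr.2 else m) m)
    PySem.Set.empty

def pvPreB (query : String) : List String :=
  (PySem.List.pyRange 0 (pvGroups.length : Int) 1).flatMap
    (fun r => if PySem.Set.contains (pvMatched query) r then PySem.List.pyGetD pvGroups r [] else [])

theorem pvA_eq (query : String) (filters : Option (List (String × List String))) :
    determine_providers_py query filters = pvPost (pvPreA query) filters := rfl

theorem pvB_eq (query : String) (filters : Option (List (String × List String))) :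
    determine_providers_py_alt query filters = pvPost (pvPreB query) filters := rfl

-- generic: membership after a fold that conditionally Set.updates the accumulator
theorem pv_mem_foldl_if {β : Type} (l : List β) (g : β → Bool) (h : β → List Int) :
    ∀ (s : PySem.Set Int) (r : Int),
      r ∈ l.foldl (fun m x => if g x then PySem.Set.update m (h x) else m) s ↔
        r ∈ s ∨ ∃ x ∈ l, g x = true ∧ r ∈ h x := by
  induction l with
  | nil => simp
  | cons a t ih =>
    intro s r
    simp only [List.foldl_cons]
    by_cases hg : g a = true
    · simp only [hg, if_true]
      rw [ih]
      simp [PySem.Set.mem_update]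
      tauto
    · rw [if_neg hg, ih]
      simp only [List.mem_cons]
      constructor
      · rintro (h | ⟨x, hx, hgx, hr⟩)
        · exact Or.inl h
        · exact Or.inr ⟨x, Or.inr hx, hgx, hr⟩
      · rintro (h | ⟨x, hx, hgx, hr⟩)
        · exact Or.inl h
        · rcases hx with rfl | hx
          · exact absurd hgx hg
          · exact Or.inr ⟨x, hx, hgx, hr⟩

-- generic: membership after a fold whose step only adds elements described by P
theorem pv_mem_foldl_outer (F : PySem.Set Int → Int → PySem.Set Int) (P : Int → Int → Prop)
    (hF : ∀ s i r, r ∈ F s i ↔ r ∈ s ∨ P i r) (l : List Int) :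
    ∀ (s : PySem.Set Int) (r : Int), r ∈ l.foldl F s ↔ r ∈ s ∨ ∃ i ∈ l, P i r := by
  induction l with
  | nil => simp
  | cons a t ih =>
    intro s r
    simp only [List.foldl_cons]
    rw [ih, hF]
    constructor
    · rintro ((h | h) | ⟨i, hi, h⟩)
      · exact Or.inl h
      · exact Or.inr ⟨a, List.mem_cons_self, h⟩
      · exact Or.inr ⟨i, List.mem_cons_of_mem _ hi, h⟩
    · rintro (h | ⟨i, hi, h⟩)
      · exact Or.inl (Or.inl h)
      · rcases List.mem_cons.mp hi with rfl | hi
        · exact Or.inl (Or.inr h)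
        · exact Or.inr ⟨i, hi, h⟩

-- position-scan ↔ containment, for a nonempty pattern
theorem pv_scan_iff (L kw : List Char) (hne : kw ≠ []) :
    (∃ i ∈ PySem.List.pyRange 0 (L.length : Int) 1, PySem.Chars.startswith (L.drop i.toNat) kw = true)
      ↔ PySem.Chars.isIn kw L = true := by
  rw [← PySem.Chars.exists_prefix_drop_iff_isIn]
  constructor
  · rintro ⟨i, _, hs⟩
    exact ⟨i.toNat, (PySem.Chars.startswith_iff _ _).mp hs⟩
  · rintro ⟨j, hpre⟩
    have hj : j < L.length := by
      by_contra hle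
      rw [List.drop_eq_nil_of_le (by omega)] at hpre
      exact hne (List.prefix_nil.mp hpre)
    refine ⟨(j : Int), ?_, ?_⟩
    · rw [PySem.List.mem_pyRange_one]
      constructor <;> [positivity; exact_mod_cast hj]
    · rw [PySem.Chars.startswith_iff]
      simpa using hpre

-- membership in B's matched set = some keyword of the table occurs in the query and names the rule
theorem pv_mem_matched (query : String) (r : Int) :
    r ∈ pvMatched query ↔
      ∃ kr ∈ pvKeywords, PySem.Chars.isIn kr.1.toList (PySem.Str.lower query).toList = true ∧ r ∈ kr.2 := by
  unfold pvMatched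
  rw [pv_mem_foldl_outer
        (fun m i => pvKeywords.foldl (fun m kr =>
          if PySem.Chars.startswith ((PySem.Str.lower query).toList.drop i.toNat) kr.1.toList then PySem.Set.update m kr.2 else m) m)
        (fun i r => ∃ kr ∈ pvKeywords, PySem.Chars.startswith ((PySem.Str.lower query).toList.drop i.toNat) kr.1.toList = true ∧ r ∈ kr.2)
        (fun s i r => pv_mem_foldl_if pvKeywords _ _ s r)]
  have hlen : PySem.Str.len (PySem.Str.lower query) = (((PySem.Str.lower query).toList.length : Nat) : Int) := by simp
  rw [hlen]
  simp only [PySem.Set.empty, List.not_mem_nil, false_or]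
  constructor
  · rintro ⟨i, hi, kr, hkr, hs, hr⟩
    refine ⟨kr, hkr, ?_, hr⟩
    have hne : kr.1.toList ≠ [] := by
      fin_cases hkr <;> simp
    exact (pv_scan_iff _ _ hne).mp ⟨i, hi, hs⟩
  · rintro ⟨kr, hkr, hin, hr⟩
    have hne : kr.1.toList ≠ [] := by
      fin_cases hkr <;> simp
    obtain ⟨i, hi, hs⟩ := (pv_scan_iff _ _ hne).mpr hin
    exact ⟨i, hi, kr, hkr, hs, hr⟩

theorem pvPre_eq (query : String) : pvPreA query = pvPreB query := by
  have hc : ∀ r : Int, PySem.Set.contains (pvMatched query) r = true ↔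
      ∃ kr ∈ pvKeywords, PySem.Chars.isIn kr.1.toList (PySem.Str.lower query).toList = true ∧ r ∈ kr.2 :=
    fun r => (PySem.Set.contains_iff _ _).trans (pv_mem_matched query r)
  have h0 : PySem.Set.contains (pvMatched query) 0 = (["restaurant", "dining", "eat", "food", "cuisine"].any (fun word => PySem.Str.isIn word (PySem.Str.lower query))) := by
    rw [Bool.eq_iff_iff, hc]
    simp [pvKeywords]
  have h1 : PySem.Set.contains (pvMatched query) 1 = (["camp", "camping", "park", "trail", "hike"].any (fun word => PySem.Str.isIn word (PySem.Str.lower query))) := by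
    rw [Bool.eq_iff_iff, hc]
    simp [pvKeywords]
  have h2 : PySem.Set.contains (pvMatched query) 2 = (["charging", "ev", "electric", "charge"].any (fun word => PySem.Str.isIn word (PySem.Str.lower query))) := by
    rw [Bool.eq_iff_iff, hc]
    simp [pvKeywords]
  have h3 : PySem.Set.contains (pvMatched query) 3 = (["tour", "activity", "experience", "adventure"].any (fun word => PySem.Str.isIn word (PySem.Str.lower query))) := by
    rw [Bool.eq_iff_iff, hc]
    simp [pvKeywords]
  have h4 : PySem.Set.contains (pvMatched query) 4 = (["hotel", "stay", "accommodation", "room"].any (fun word => PySem.Str.isIn word (PySem.Str.lower query))) := by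
    rw [Bool.eq_iff_iff, hc]
    simp [pvKeywords]
  have h5 : PySem.Set.contains (pvMatched query) 5 = (["parking", "park", "garage"].any (fun word => PySem.Str.isIn word (PySem.Str.lower query))) := by
    rw [Bool.eq_iff_iff, hc]
    simp [pvKeywords]
    constructor <;> rintro (h | h | h)
    · exact Or.inr (Or.inl h)
    · exact Or.inl h
    · exact Or.inr (Or.inr h)
    · exact Or.inr (Or.inl h)
    · exact Or.inl h
    · exact Or.inr (Or.inr h)
  have hrange : PySem.List.pyRange 0 (pvGroups.length : Int) 1 = [0, 1, 2, 3, 4, 5] := by norm_num [pvGroups]; decide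
  unfold pvPreA pvPreB
  rw [hrange]
  simp only [List.flatMap_cons, List.flatMap_nil, List.append_nil]
  rw [h0, h1, h2, h3, h4, h5]
  cases ["restaurant", "dining", "eat", "food", "cuisine"].any (fun word => PySem.Str.isIn word (PySem.Str.lower query)) <;>
  cases ["camp", "camping", "park", "trail", "hike"].any (fun word => PySem.Str.isIn word (PySem.Str.lower query)) <;>
  cases ["charging", "ev", "electric", "charge"].any (fun word => PySem.Str.isIn word (PySem.Str.lower query)) <;>
  cases ["tour", "activity", "experience", "adventure"].any (fun word => PySem.Str.isIn word (PySem.Str.lower query)) <;>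
  cases ["hotel", "stay", "accommodation", "room"].any (fun word => PySem.Str.isIn word (PySem.Str.lower query)) <;>
  cases ["parking", "park", "garage"].any (fun word => PySem.Str.isIn word (PySem.Str.lower query)) <;>
  rfl

-- ===== VERDICT (by name: the statement is the Claim_ definition above) =====
theorem determine_providers_py_spec : Claim_equal_determine_providers_py := by
  intro query filters _
  unfold Spec_determine_providers_py
  rw [pvA_eq, pvB_eq, pvPre_eq]
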